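-- pv_equiv track=rewrite | github.com/martynabaran/NLP-project3 | setOperationsHandler.py | perform_set_operations
-- ===== SOURCE A (Python) =====
-- def perform_set_operations(verb, other_verbs, op, verb_dict):
--
--     verb_set = set(verb_dict.get(verb, []))
--
--     for other_verb in other_verbs:
--
--         other_verb_set = set(verb_dict.get(other_verb, []))
--         if op == 'sum':
--             verb_set = verb_set.union(other_verb_set)
--         elif op == 'intersection':
--             verb_set = verb_set.intersection(other_verb_set)
--         elif op == 'difference':
--             verb_set = verb_set.difference(other_verb_set)
--
--     return verb_set
-- ===== SOURCE B (Python) =====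
-- def perform_set_operations(verb, other_verbs, op, verb_dict):
--     base = set(verb_dict.get(verb, []))
--     pools = [verb_dict.get(ov, []) for ov in other_verbs]
--     if op == 'sum':
--         return base.union(*pools)
--     if op == 'intersection':
--         return {x for x in base if all(x in pool for pool in pools)}
--     if op == 'difference':
--         banned = set().union(*pools)
--         return {x for x in base if x not in banned}
--     return base
-- ===== Notes on version B (the rewrite author's own statement) =====
-- stated objective: idiomatic
-- what changed: The per-element branch inside the loop is replaced by a single dispatch on op: 'sum' becomes one variadic union over the raw lists, 'intersection' becomes one filter of the base set by membership in every pool, 'difference' filters the base against one combined union, and no per-other-verb temporary set is built.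
import Mathlib
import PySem

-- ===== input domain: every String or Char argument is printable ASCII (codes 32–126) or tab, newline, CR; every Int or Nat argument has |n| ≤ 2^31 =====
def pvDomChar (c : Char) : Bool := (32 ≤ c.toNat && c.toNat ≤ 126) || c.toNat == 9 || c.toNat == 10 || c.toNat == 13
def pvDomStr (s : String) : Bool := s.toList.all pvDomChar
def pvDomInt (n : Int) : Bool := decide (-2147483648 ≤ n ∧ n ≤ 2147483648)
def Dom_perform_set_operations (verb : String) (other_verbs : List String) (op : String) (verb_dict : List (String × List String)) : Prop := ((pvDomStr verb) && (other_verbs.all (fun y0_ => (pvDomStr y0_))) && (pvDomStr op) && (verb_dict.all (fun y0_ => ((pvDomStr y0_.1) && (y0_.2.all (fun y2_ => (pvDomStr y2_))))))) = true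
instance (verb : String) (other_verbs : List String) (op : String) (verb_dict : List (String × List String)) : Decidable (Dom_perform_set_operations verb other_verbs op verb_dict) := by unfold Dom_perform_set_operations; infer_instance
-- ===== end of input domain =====

-- B hoists the op-dispatch out of the loop: one variadic union / one membership filter
-- instead of A's per-other-verb set construction and accumulation (objective: idiomatic).

-- ===== PORT A =====
def perform_set_operations (verb : String) (other_verbs : List String) (op : String) (verb_dict : List (String × List String)) : List String :=
  let d : PySem.Dict String (List String) := ⟨verb_dict⟩
  other_verbs.foldl
    (fun verb_set other_verb =>
      let other_verb_set := PySem.Set.ofList (d.getD other_verb [])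
      if op == "sum" then PySem.Set.union verb_set other_verb_set
      else if op == "intersection" then PySem.Set.inter verb_set other_verb_set
      else if op == "difference" then PySem.Set.diff verb_set other_verb_set
      else verb_set)
    (PySem.Set.ofList (d.getD verb []))

-- ===== PORT B =====
def perform_set_operations_alt (verb : String) (other_verbs : List String) (op : String) (verb_dict : List (String × List String)) : List String :=
  let d : PySem.Dict String (List String) := ⟨verb_dict⟩
  let base : PySem.Set String := PySem.Set.ofList (d.getD verb [])
  let pools : List (List String) := other_verbs.map (fun ov => d.getD ov [])
  if op == "sum" then PySem.Set.update base pools.flatten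
  else if op == "intersection" then base.filter (fun x => pools.all (fun pool => pool.contains x))
  else if op == "difference" then
    let banned : PySem.Set String := PySem.Set.ofList pools.flatten
    base.filter (fun x => !banned.contains x)
  else base

-- ===== PRECONDITION & SPEC =====
def Spec_perform_set_operations (verb : String) (other_verbs : List String) (op : String) (verb_dict : List (String × List String)) (out : List String) : Prop := out = perform_set_operations_alt verb other_verbs op verb_dict
instance (verb : String) (other_verbs : List String) (op : String) (verb_dict : List (String × List String)) (out : List String) : Decidable (Spec_perform_set_operations verb other_verbs op verb_dict out) := by unfold Spec_perform_set_operations; infer_instance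

-- ===== CLAIM (what is proved, stated in full; the proofs are below) =====
def Claim_equal_perform_set_operations : Prop := ∀ (verb : String) (other_verbs : List String) (op : String) (verb_dict : List (String × List String)), Dom_perform_set_operations verb other_verbs op verb_dict → Spec_perform_set_operations verb other_verbs op verb_dict (perform_set_operations verb other_verbs op verb_dict)

-- ===== LEMMAS AND PROOFS =====

-- contains on set(t) equals contains on the raw list t
theorem pv_contains_ofList (t : List String) (x : String) :
    (PySem.Set.ofList t).contains x = t.contains x := by
  simp [PySem.Set.contains_eq_listContains]

-- a union-with-a-set step equals a union-with-the-raw-list step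
theorem pv_update_ofList (s : PySem.Set String) (t : List String) :
    PySem.Set.update s (PySem.Set.ofList t) = PySem.Set.update s t := by
  rw [PySem.Set.update_eq_append_filter, PySem.Set.update_eq_append_filter,
    PySem.Set.ofList_ofList]

-- A's sum loop = one update with the concatenation of the pools
theorem pv_sum_loop (g : String → List String) (l : List String) (s : PySem.Set String) :
    l.foldl (fun vs ov => PySem.Set.union vs (PySem.Set.ofList (g ov))) s
      = PySem.Set.update s (l.map g).flatten := by
  induction l generalizing s with
  | nil => rfl
  | cons a l ih =>
      simp only [List.foldl_cons, List.map_cons, List.flatten_cons, PySem.Set.update_append]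
      rw [PySem.Set.union, pv_update_ofList, ih]

-- A's intersection loop = one filter by membership in every pool
theorem pv_inter_loop (g : String → List String) (l : List String) (s : PySem.Set String) :
    l.foldl (fun vs ov => PySem.Set.inter vs (PySem.Set.ofList (g ov))) s
      = s.filter (fun x => (l.map g).all (fun pool => pool.contains x)) := by
  induction l generalizing s with
  | nil => simp
  | cons a l ih =>
      simp only [List.foldl_cons, List.map_cons, List.all_cons]
      rw [PySem.Set.inter, ih, List.filter_filter]
      congr 1
      funext x
      rw [pv_contains_ofList, Bool.and_comm]

-- A's difference loop = one filter against the concatenation of the pools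
theorem pv_diff_loop (g : String → List String) (l : List String) (s : PySem.Set String) :
    l.foldl (fun vs ov => PySem.Set.diff vs (PySem.Set.ofList (g ov))) s
      = s.filter (fun x => !((l.map g).flatten).contains x) := by
  induction l generalizing s with
  | nil => simp
  | cons a l ih =>
      simp only [List.foldl_cons, List.map_cons, List.flatten_cons]
      rw [PySem.Set.diff, ih, List.filter_filter]
      congr 1
      funext x
      rw [pv_contains_ofList, List.contains_append]
      cases (g a).contains x <;> cases ((l.map g).flatten).contains x <;> rfl

-- ===== VERDICT (by name: the statement is the Claim_ definition above) =====
theorem perform_set_operations_spec : Claim_equal_perform_set_operations := by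
  intro verb other_verbs op verb_dict _
  unfold Spec_perform_set_operations perform_set_operations perform_set_operations_alt
  by_cases h1 : op == "sum"
  · simp only [h1, if_true]
    exact pv_sum_loop _ other_verbs _
  · simp only [h1, if_false, Bool.false_eq_true]
    by_cases h2 : op == "intersection"
    · simp only [h2, if_true]
      exact pv_inter_loop _ other_verbs _
    · simp only [h2, if_false, Bool.false_eq_true]
      by_cases h3 : op == "difference"
      · simp only [h3, if_true]
        rw [pv_diff_loop]
        congr 1
        funext x
        rw [pv_contains_ofList]
      · simp only [h3, if_false, Bool.false_eq_true, List.foldl_fixed]
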